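-- pv_equiv track=rewrite | github.com/JimmyCalvoMonge/adaptive | matlab_utils.py | histc
-- ===== SOURCE A (Python) =====
-- def histc(x, bins):
--     if not isinstance(x, list):
--         x = [x]
--     x_idx = [0]*len(x)
--     for idx, xx in enumerate(x):
--         found = False
--         for i in range(len(bins) - 1):
--             if (xx >= bins[i]) and (xx < bins[i+1]) and not found:
--                 found = True
--                 x_idx[idx] = i + 1
--     return x_idx
-- ===== SOURCE B (Python) =====
-- def histc(x, bins):
--     if not isinstance(x, list):
--         x = [x]
--     res = [0] * len(x)
--     pending = list(range(len(x)))
--     for i in range(len(bins) - 1):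
--         lo, hi = bins[i], bins[i + 1]
--         still = []
--         for j in pending:
--             if lo <= x[j] < hi:
--                 res[j] = i + 1
--             else:
--                 still.append(j)
--         pending = still
--     return res
-- ===== Notes on version B (the rewrite author's own statement) =====
-- stated objective: alternative
-- what changed: A scans all bin intervals per element with a 'found' flag that never stops the inner loop; B inverts the loops into a bin-major sweep that keeps a shrinking list of still-unassigned element indices, writing i+1 into the result the first time an interval covers an element and dropping that index from further passes.
import Mathlib
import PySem

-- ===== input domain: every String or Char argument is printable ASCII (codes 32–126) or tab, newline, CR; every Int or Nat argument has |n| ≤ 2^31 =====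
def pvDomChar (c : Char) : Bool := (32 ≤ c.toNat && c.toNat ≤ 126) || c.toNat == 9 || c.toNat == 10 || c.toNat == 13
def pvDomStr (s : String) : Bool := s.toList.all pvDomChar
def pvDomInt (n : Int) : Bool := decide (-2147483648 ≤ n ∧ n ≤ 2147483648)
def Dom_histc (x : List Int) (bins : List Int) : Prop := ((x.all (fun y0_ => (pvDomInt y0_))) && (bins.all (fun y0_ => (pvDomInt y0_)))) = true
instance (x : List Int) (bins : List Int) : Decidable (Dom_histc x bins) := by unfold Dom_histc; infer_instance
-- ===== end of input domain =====

-- B replaces A's element-major double scan (which keeps scanning bins after a hit via a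
-- 'found' flag) by a bin-major pass that keeps a shrinking list of still-unassigned
-- element indices; objective: alternative traversal (same results, less redundant work).

-- ===== PORT A =====
def histc (x : List Int) (bins : List Int) : List Int :=
  let xIdx : List Int := List.replicate x.length (0 : Int)
  (PySem.List.enumerate x 0).foldl (fun xIdx p =>
    ((PySem.List.pyRange 0 ((bins.length : Int) - 1) 1).foldl
      (fun (st : Bool × List Int) i =>
        if PySem.List.pyGetD bins i 0 ≤ p.2 ∧ p.2 < PySem.List.pyGetD bins (i + 1) 0 ∧ st.1 = false
        then (true, PySem.List.pySetD st.2 p.1 (i + 1))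
        else st) (false, xIdx)).2) xIdx

-- ===== PORT B =====
def histc_alt (x : List Int) (bins : List Int) : List Int :=
  let res : List Int := List.replicate x.length (0 : Int)
  let pending : List Int := PySem.List.pyRange 0 (x.length : Int) 1
  ((PySem.List.pyRange 0 ((bins.length : Int) - 1) 1).foldl
    (fun (st : List Int × List Int) i =>
      st.2.foldl
        (fun (q : List Int × List Int) j =>
          if PySem.List.pyGetD bins i 0 ≤ PySem.List.pyGetD x j 0 ∧
             PySem.List.pyGetD x j 0 < PySem.List.pyGetD bins (i + 1) 0
          then (PySem.List.pySetD q.1 j (i + 1), q.2)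
          else (q.1, q.2 ++ [j])) (st.1, ([] : List Int))) (res, pending)).1

-- ===== PRECONDITION & SPEC =====
def Spec_histc (x : List Int) (bins : List Int) (out : List Int) : Prop := out = histc_alt x bins
instance (x : List Int) (bins : List Int) (out : List Int) : Decidable (Spec_histc x bins out) := by unfold Spec_histc; infer_instance

-- ===== CLAIM (what is proved, stated in full; the proofs are below) =====
def Claim_equal_histc : Prop := ∀ (x : List Int) (bins : List Int), Dom_histc x bins → Spec_histc x bins (histc x bins)

-- ===== LEMMAS AND PROOFS =====

/-- First interval index (plus one) of `is` whose half-open bin interval contains `v`; 0 if none. -/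
def fh (bins : List Int) (v : Int) : List Int → Int
  | [] => 0
  | i :: is =>
    if PySem.List.pyGetD bins i 0 ≤ v ∧ v < PySem.List.pyGetD bins (i + 1) 0 then i + 1
    else fh bins v is

/-- Once `found` is true, A's inner loop changes nothing. -/
theorem A_done (bins : List Int) (xx idx : Int) :
    ∀ (is : List Int) (l : List Int),
    is.foldl (fun (st : Bool × List Int) i =>
        if PySem.List.pyGetD bins i 0 ≤ xx ∧ xx < PySem.List.pyGetD bins (i + 1) 0 ∧ st.1 = false
        then (true, PySem.List.pySetD st.2 idx (i + 1))
        else st) (true, l) = (true, l) := by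
  intro is
  induction is with
  | nil => intro l; rfl
  | cons i t ih => intro l; simpa using ih l

/-- A's inner loop computes the first-hit value `fh` and writes it at `idx` (if any hit). -/
theorem A_inner (bins : List Int) (xx idx : Int) :
    ∀ (is : List Int) (l : List Int), (∀ i ∈ is, 0 ≤ i) →
    (is.foldl (fun (st : Bool × List Int) i =>
        if PySem.List.pyGetD bins i 0 ≤ xx ∧ xx < PySem.List.pyGetD bins (i + 1) 0 ∧ st.1 = false
        then (true, PySem.List.pySetD st.2 idx (i + 1))
        else st) (false, l)).2
      = if fh bins xx is = 0 then l else PySem.List.pySetD l idx (fh bins xx is) := by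
  intro is
  induction is with
  | nil => intro l _; simp [fh]
  | cons i t ih =>
    intro l hpos
    have hi : (0:Int) ≤ i := hpos i (by simp)
    rw [List.foldl_cons]
    by_cases hc : PySem.List.pyGetD bins i 0 ≤ xx ∧ xx < PySem.List.pyGetD bins (i + 1) 0
    · rw [if_pos ⟨hc.1, hc.2, rfl⟩, A_done]
      have hf : fh bins xx (i :: t) = i + 1 := by simp [fh, hc]
      rw [hf, if_neg (by omega)]
    · rw [if_neg (by tauto), ih l (fun j hj => hpos j (by simp [hj]))]
      have hf : fh bins xx (i :: t) = fh bins xx t := by simp [fh, hc]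
      rw [hf]

/-- Reading after a write (nonnegative in-range index). -/
theorem getD_pySetD (res : List Int) (j v : Int) (h0 : 0 ≤ j) (h1 : j < (res.length : Int))
    (k : Nat) :
    (PySem.List.pySetD res j v).getD k 0 = if (k : Int) = j then v else res.getD k 0 := by
  rw [PySem.List.pySetD_of_nonneg res v h0]
  by_cases hkj : (k : Int) = j
  · have : j.toNat = k := by omega
    subst this
    rw [if_pos hkj]
    have hk : j.toNat < res.length := by omega
    simp [List.getD, hk]
  · rw [if_neg hkj]
    have : j.toNat ≠ k := by omega
    simp [List.getD, this]

/-- A's outer loop over `enumerate` fills positions left to right with `fh` values. -/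
theorem A_outer (bins : List Int) :
    ∀ (xs pre : List Int),
    (PySem.List.enumerate xs (pre.length : Int)).foldl
      (fun xIdx (p : Int × Int) =>
        ((PySem.List.pyRange 0 ((bins.length : Int) - 1) 1).foldl
          (fun (st : Bool × List Int) i =>
            if PySem.List.pyGetD bins i 0 ≤ p.2 ∧ p.2 < PySem.List.pyGetD bins (i + 1) 0 ∧ st.1 = false
            then (true, PySem.List.pySetD st.2 p.1 (i + 1))
            else st) (false, xIdx)).2)
      (pre ++ List.replicate xs.length 0)
    = pre ++ xs.map (fun v => fh bins v (PySem.List.pyRange 0 ((bins.length : Int) - 1) 1)) := by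
  intro xs
  induction xs with
  | nil => intro pre; simp [PySem.List.enumerate]
  | cons xx rest ih =>
    intro pre
    rw [PySem.List.enumerate_cons, List.foldl_cons]
    rw [A_inner bins xx (pre.length : Int) _ _
      (fun i hi => ((PySem.List.mem_pyRange_one).1 hi).1)]
    set c := fh bins xx (PySem.List.pyRange 0 ((bins.length : Int) - 1) 1) with hcdef
    have hstate :
        (if c = 0 then pre ++ List.replicate (xx :: rest).length 0
         else PySem.List.pySetD (pre ++ List.replicate (xx :: rest).length 0) (pre.length : Int) c)
        = (pre ++ [c]) ++ List.replicate rest.length 0 := by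
      by_cases hc0 : c = 0
      · rw [if_pos hc0, hc0]
        simp [List.replicate_succ, List.append_assoc]
      · rw [if_neg hc0, PySem.List.pySetD_natCast]
        rw [List.length_cons, List.replicate_succ, List.set_append_right _ _ (le_refl _)]
        simp [List.append_assoc]
    rw [hstate]
    have hlen : ((pre ++ [c]).length : Int) = (pre.length : Int) + 1 := by
      simp
    rw [← hlen, ih (pre ++ [c])]
    simp only [List.append_assoc, List.cons_append, List.nil_append, List.map_cons]
    rw [← hcdef]

/-- A computes the map of `fh` over `x`. -/
theorem A_eq_map (x bins : List Int) :
    histc x bins = x.map (fun v => fh bins v (PySem.List.pyRange 0 ((bins.length : Int) - 1) 1)) := by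
  have h := A_outer bins x []
  simpa [histc] using h

/-- B's inner pass: writes `i+1` at every pending index whose value lies in bin `i`,
    and keeps the others (in order) as the new pending list. -/
theorem B_inner (x bins : List Int) (i : Int) :
    ∀ (P res acc : List Int), (∀ j ∈ P, 0 ≤ j ∧ j < (res.length : Int)) →
    ((P.foldl (fun (q : List Int × List Int) j =>
        if PySem.List.pyGetD bins i 0 ≤ PySem.List.pyGetD x j 0 ∧
           PySem.List.pyGetD x j 0 < PySem.List.pyGetD bins (i + 1) 0
        then (PySem.List.pySetD q.1 j (i + 1), q.2)
        else (q.1, q.2 ++ [j])) (res, acc)).1.length = res.length)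
    ∧ (∀ k : Nat, k < res.length →
        ((P.foldl (fun (q : List Int × List Int) j =>
            if PySem.List.pyGetD bins i 0 ≤ PySem.List.pyGetD x j 0 ∧
               PySem.List.pyGetD x j 0 < PySem.List.pyGetD bins (i + 1) 0
            then (PySem.List.pySetD q.1 j (i + 1), q.2)
            else (q.1, q.2 ++ [j])) (res, acc)).1.getD k 0
          = if (k : Int) ∈ P ∧ PySem.List.pyGetD bins i 0 ≤ PySem.List.pyGetD x (k : Int) 0 ∧
               PySem.List.pyGetD x (k : Int) 0 < PySem.List.pyGetD bins (i + 1) 0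
            then i + 1 else res.getD k 0))
    ∧ ((P.foldl (fun (q : List Int × List Int) j =>
        if PySem.List.pyGetD bins i 0 ≤ PySem.List.pyGetD x j 0 ∧
           PySem.List.pyGetD x j 0 < PySem.List.pyGetD bins (i + 1) 0
        then (PySem.List.pySetD q.1 j (i + 1), q.2)
        else (q.1, q.2 ++ [j])) (res, acc)).2
      = acc ++ P.filter (fun j => ! decide (PySem.List.pyGetD bins i 0 ≤ PySem.List.pyGetD x j 0 ∧
          PySem.List.pyGetD x j 0 < PySem.List.pyGetD bins (i + 1) 0))) := by
  intro P
  induction P with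
  | nil =>
    intro res acc _
    refine ⟨rfl, ?_, by simp⟩
    intro k hk
    rw [if_neg (by intro h; exact (List.not_mem_nil (a := (k : Int))) h.1)]
    rfl
  | cons j t ih =>
    intro res acc hb
    have hj := hb j (by simp)
    by_cases hc : PySem.List.pyGetD bins i 0 ≤ PySem.List.pyGetD x j 0 ∧
        PySem.List.pyGetD x j 0 < PySem.List.pyGetD bins (i + 1) 0
    · rw [List.foldl_cons, if_pos hc]
      have hlen : (PySem.List.pySetD res j (i + 1)).length = res.length :=
        PySem.List.length_pySetD _ _ _
      obtain ⟨ih1, ih2, ih3⟩ := ih (PySem.List.pySetD res j (i + 1)) acc (by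
        intro j' hj'
        rw [hlen]
        exact hb j' (by simp [hj']))
      refine ⟨by rw [ih1, hlen], ?_, ?_⟩
      · intro k hk
        rw [ih2 k (by rw [hlen]; exact hk)]
        rw [getD_pySetD res j (i + 1) hj.1 hj.2 k]
        simp only [List.mem_cons]
        by_cases hkj : (k : Int) = j
        · by_cases hkt : (k : Int) ∈ t ∧ PySem.List.pyGetD bins i 0 ≤ PySem.List.pyGetD x (k : Int) 0 ∧
              PySem.List.pyGetD x (k : Int) 0 < PySem.List.pyGetD bins (i + 1) 0
          · rw [if_pos hkt, if_pos ⟨Or.inl hkj, hkt.2⟩]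
          · rw [if_neg hkt, if_pos hkj, if_pos ⟨Or.inl hkj, by rw [hkj]; exact hc⟩]
        · by_cases hkt : (k : Int) ∈ t ∧ PySem.List.pyGetD bins i 0 ≤ PySem.List.pyGetD x (k : Int) 0 ∧
              PySem.List.pyGetD x (k : Int) 0 < PySem.List.pyGetD bins (i + 1) 0
          · rw [if_pos hkt, if_pos ⟨Or.inr hkt.1, hkt.2⟩]
          · rw [if_neg hkt, if_neg hkj, if_neg (by
              intro hcon
              rcases hcon.1 with h | h
              · exact hkj h
              · exact hkt ⟨h, hcon.2⟩)]
      · rw [ih3, List.filter_cons_of_neg (by simp [hc])]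
    · rw [List.foldl_cons, if_neg hc]
      obtain ⟨ih1, ih2, ih3⟩ := ih res (acc ++ [j]) (fun j' hj' => hb j' (by simp [hj']))
      refine ⟨ih1, ?_, ?_⟩
      · intro k hk
        rw [ih2 k hk]
        simp only [List.mem_cons]
        by_cases hkt : (k : Int) ∈ t ∧ PySem.List.pyGetD bins i 0 ≤ PySem.List.pyGetD x (k : Int) 0 ∧
            PySem.List.pyGetD x (k : Int) 0 < PySem.List.pyGetD bins (i + 1) 0
        · rw [if_pos hkt, if_pos ⟨Or.inr hkt.1, hkt.2⟩]
        · rw [if_neg hkt, if_neg (by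
            intro hcon
            rcases hcon.1 with h | h
            · exact hc (h ▸ hcon.2)
            · exact hkt ⟨h, hcon.2⟩)]
      · rw [ih3, List.filter_cons_of_pos (by simp [hc]), List.append_assoc, List.singleton_append]

/-- B's outer loop: final result holds `fh` at every pending index that gets a hit. -/
theorem B_outer (x bins : List Int) :
    ∀ (is : List Int), (∀ i ∈ is, 0 ≤ i) →
    ∀ (res P : List Int), (∀ j ∈ P, 0 ≤ j ∧ j < (res.length : Int)) →
    ((is.foldl (fun (st : List Int × List Int) i =>
        st.2.foldl (fun (q : List Int × List Int) j =>
          if PySem.List.pyGetD bins i 0 ≤ PySem.List.pyGetD x j 0 ∧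
             PySem.List.pyGetD x j 0 < PySem.List.pyGetD bins (i + 1) 0
          then (PySem.List.pySetD q.1 j (i + 1), q.2)
          else (q.1, q.2 ++ [j])) (st.1, ([] : List Int))) (res, P)).1.length = res.length)
    ∧ (∀ k : Nat, k < res.length →
        ((is.foldl (fun (st : List Int × List Int) i =>
            st.2.foldl (fun (q : List Int × List Int) j =>
              if PySem.List.pyGetD bins i 0 ≤ PySem.List.pyGetD x j 0 ∧
                 PySem.List.pyGetD x j 0 < PySem.List.pyGetD bins (i + 1) 0
              then (PySem.List.pySetD q.1 j (i + 1), q.2)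
              else (q.1, q.2 ++ [j])) (st.1, ([] : List Int))) (res, P)).1.getD k 0
          = if (k : Int) ∈ P ∧ fh bins (PySem.List.pyGetD x (k : Int) 0) is ≠ 0
            then fh bins (PySem.List.pyGetD x (k : Int) 0) is else res.getD k 0))
    ∧ ((is.foldl (fun (st : List Int × List Int) i =>
        st.2.foldl (fun (q : List Int × List Int) j =>
          if PySem.List.pyGetD bins i 0 ≤ PySem.List.pyGetD x j 0 ∧
             PySem.List.pyGetD x j 0 < PySem.List.pyGetD bins (i + 1) 0
          then (PySem.List.pySetD q.1 j (i + 1), q.2)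
          else (q.1, q.2 ++ [j])) (st.1, ([] : List Int))) (res, P)).2
      = P.filter (fun j => decide (fh bins (PySem.List.pyGetD x j 0) is = 0))) := by
  intro is
  induction is with
  | nil =>
    intro _ res P hb
    refine ⟨rfl, ?_, by simp [fh]⟩
    intro k hk
    rw [if_neg (by intro h; exact h.2 rfl)]
    rfl
  | cons i t ih =>
    intro hpos res P hb
    have hi : (0:Int) ≤ i := hpos i (by simp)
    simp only [List.foldl_cons]
    obtain ⟨f1, f2, f3⟩ := B_inner x bins i P res [] hb
    rw [← Prod.mk.eta (p := P.foldl _ (res, ([] : List Int)))]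
    have hb1 : ∀ j ∈ (P.foldl (fun (q : List Int × List Int) j =>
          if PySem.List.pyGetD bins i 0 ≤ PySem.List.pyGetD x j 0 ∧
             PySem.List.pyGetD x j 0 < PySem.List.pyGetD bins (i + 1) 0
          then (PySem.List.pySetD q.1 j (i + 1), q.2)
          else (q.1, q.2 ++ [j])) (res, ([] : List Int))).2, 0 ≤ j ∧ j < (((P.foldl (fun (q : List Int × List Int) j =>
          if PySem.List.pyGetD bins i 0 ≤ PySem.List.pyGetD x j 0 ∧
             PySem.List.pyGetD x j 0 < PySem.List.pyGetD bins (i + 1) 0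
          then (PySem.List.pySetD q.1 j (i + 1), q.2)
          else (q.1, q.2 ++ [j])) (res, ([] : List Int))).1).length : Int) := by
      intro j hj
      rw [f3, List.nil_append] at hj
      rw [f1]
      exact hb j (List.mem_filter.1 hj).1
    obtain ⟨g1, g2, g3⟩ := ih (fun i' hi' => hpos i' (by simp [hi'])) (P.foldl (fun (q : List Int × List Int) j =>
          if PySem.List.pyGetD bins i 0 ≤ PySem.List.pyGetD x j 0 ∧
             PySem.List.pyGetD x j 0 < PySem.List.pyGetD bins (i + 1) 0
          then (PySem.List.pySetD q.1 j (i + 1), q.2)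
          else (q.1, q.2 ++ [j])) (res, ([] : List Int))).1 (P.foldl (fun (q : List Int × List Int) j =>
          if PySem.List.pyGetD bins i 0 ≤ PySem.List.pyGetD x j 0 ∧
             PySem.List.pyGetD x j 0 < PySem.List.pyGetD bins (i + 1) 0
          then (PySem.List.pySetD q.1 j (i + 1), q.2)
          else (q.1, q.2 ++ [j])) (res, ([] : List Int))).2 hb1
    refine ⟨by rw [g1, f1], ?_, ?_⟩
    · intro k hk
      rw [g2 k (by rw [f1]; exact hk), f3, f2 k hk, List.nil_append]
      have hmem : ((k : Int) ∈ P.filter (fun j =>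
          ! decide (PySem.List.pyGetD bins i 0 ≤ PySem.List.pyGetD x j 0 ∧
            PySem.List.pyGetD x j 0 < PySem.List.pyGetD bins (i + 1) 0)))
          ↔ ((k : Int) ∈ P ∧ ¬ (PySem.List.pyGetD bins i 0 ≤ PySem.List.pyGetD x (k : Int) 0 ∧
            PySem.List.pyGetD x (k : Int) 0 < PySem.List.pyGetD bins (i + 1) 0)) := by
        rw [List.mem_filter]
        simp only [Bool.not_eq_true', decide_eq_false_iff_not]
      simp only [hmem]
      have hfh : fh bins (PySem.List.pyGetD x (k : Int) 0) (i :: t)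
          = if PySem.List.pyGetD bins i 0 ≤ PySem.List.pyGetD x (k : Int) 0 ∧
              PySem.List.pyGetD x (k : Int) 0 < PySem.List.pyGetD bins (i + 1) 0
            then i + 1 else fh bins (PySem.List.pyGetD x (k : Int) 0) t := rfl
      rw [hfh]
      by_cases hck : PySem.List.pyGetD bins i 0 ≤ PySem.List.pyGetD x (k : Int) 0 ∧
          PySem.List.pyGetD x (k : Int) 0 < PySem.List.pyGetD bins (i + 1) 0
      · rw [if_pos hck]
        rw [if_neg (by intro h; exact h.1.2 hck)]
        by_cases hm : (k : Int) ∈ P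
        · rw [if_pos ⟨hm, hck⟩, if_pos ⟨hm, by omega⟩]
        · rw [if_neg (by intro h; exact hm h.1), if_neg (by intro h; exact hm h.1)]
      · rw [if_neg hck]
        by_cases hz : fh bins (PySem.List.pyGetD x (k : Int) 0) t = 0
        · rw [if_neg (fun h => h.2 hz), if_neg (fun h => hck h.2), if_neg (fun h => h.2 hz)]
        · by_cases hm : (k : Int) ∈ P
          · rw [if_pos ⟨⟨hm, hck⟩, hz⟩, if_pos ⟨hm, hz⟩]
          · rw [if_neg (fun h => hm h.1.1), if_neg (fun h => hm h.1), if_neg (fun h => hm h.1)]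
    · rw [g3, f3, List.nil_append, List.filter_filter]
      apply List.filter_congr
      intro j _
      by_cases hcj : PySem.List.pyGetD bins i 0 ≤ PySem.List.pyGetD x j 0 ∧
          PySem.List.pyGetD x j 0 < PySem.List.pyGetD bins (i + 1) 0
      · have hfh : fh bins (PySem.List.pyGetD x j 0) (i :: t) = i + 1 := by
          simp only [fh]
          rw [if_pos hcj]
        rw [hfh, decide_eq_true hcj, decide_eq_false (by omega : ¬ (i + 1 = (0:Int)))]
        simp
      · have hfh : fh bins (PySem.List.pyGetD x j 0) (i :: t)
            = fh bins (PySem.List.pyGetD x j 0) t := by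
          simp only [fh]
          rw [if_neg hcj]
        rw [hfh, decide_eq_false hcj]
        simp

/-- B also computes the map of `fh` over `x`; hence the two ports agree. -/
theorem histc_eq_alt (x bins : List Int) : histc x bins = histc_alt x bins := by
  obtain ⟨b1, b2, b3⟩ := B_outer x bins (PySem.List.pyRange 0 ((bins.length : Int) - 1) 1)
      (fun i hi => (PySem.List.mem_pyRange_one.1 hi).1)
      (List.replicate x.length 0) (PySem.List.pyRange 0 (x.length : Int) 1)
      (by
        intro j hj
        have hm := PySem.List.mem_pyRange_one.1 hj
        exact ⟨hm.1, by rw [List.length_replicate]; exact hm.2⟩)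
  rw [A_eq_map]
  simp only [histc_alt]
  apply List.ext_getElem
  · rw [b1]
    simp
  · intro k h1 h2
    have hk : k < x.length := by simpa using h1
    have hbk := b2 k (by simpa using hk)
    rw [List.getD_eq_getElem _ _ (by rw [b1, List.length_replicate]; exact hk)] at hbk
    rw [List.getElem_map, hbk]
    have hx : PySem.List.pyGetD x (k : Int) 0 = x[k] := by
      rw [PySem.List.pyGetD_natCast, List.getD_eq_getElem _ _ hk]
    rw [hx]
    by_cases hz : fh bins x[k] (PySem.List.pyRange 0 ((bins.length : Int) - 1) 1) = 0
    · rw [if_neg (fun h => h.2 hz), hz]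
      exact (List.getD_replicate (0:Int) hk).symm
    · rw [if_pos ⟨PySem.List.mem_pyRange_one.2 ⟨by positivity, by exact_mod_cast hk⟩, hz⟩]

-- ===== VERDICT (by name: the statement is the Claim_ definition above) =====
theorem histc_spec : Claim_equal_histc := by
  intro x bins _
  unfold Spec_histc
  exact histc_eq_alt x bins
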